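-- pv_equiv track=rewrite | github.com/ahmetdrak/drakben | core/agent/ra_output_analysis.py | _extract_vuln_findings
-- ===== SOURCE A (Python) =====
-- def _extract_vuln_findings(stdout: str, output_lower: str) -> tuple[list[str], str]:
--     """Scan output for vulnerability markers and extract matching lines."""
--     findings: list[str] = []
--     severity = "info"
--     vuln_markers = ["vulnerable", "cve-", "exploit", "injection", "xss", "rce"]
--     for marker in vuln_markers:
--         if marker in output_lower:
--             severity = "high" if marker in ("exploit", "rce") else "medium"
--             for line in stdout.splitlines():
--                 if marker in line.lower() and len(line.strip()) > 5:
--                     findings.append(line.strip()[:150])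
--                     break
--     return findings, severity
-- ===== SOURCE B (Python) =====
-- def _extract_vuln_findings(stdout: str, output_lower: str) -> tuple[list[str], str]:
--     """Single pass over the lines: precompute present markers, index first matching line per marker."""
--     vuln_markers = ["vulnerable", "cve-", "exploit", "injection", "xss", "rce"]
--     present = [m for m in vuln_markers if m in output_lower]
--     if not present:
--         severity = "info"
--     elif present[-1] in ("exploit", "rce"):
--         severity = "high"
--     else:
--         severity = "medium"
--     first = {}
--     for line in stdout.splitlines():
--         stripped = line.strip()
--         if len(stripped) > 5:
--             ll = line.lower()
--             for m in present:
--                 if m not in first and m in ll: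
--                     first[m] = stripped[:150]
--     return [first[m] for m in present if m in first], severity
-- ===== Notes on version B (the rewrite author's own statement) =====
-- stated objective: alternative
-- what changed: B precomputes the list of present markers (deriving severity from its last element) and builds a first-matching-line dict in a single pass over stdout's lines, instead of A's per-marker rescan of all lines with an inner break.
import Mathlib
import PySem

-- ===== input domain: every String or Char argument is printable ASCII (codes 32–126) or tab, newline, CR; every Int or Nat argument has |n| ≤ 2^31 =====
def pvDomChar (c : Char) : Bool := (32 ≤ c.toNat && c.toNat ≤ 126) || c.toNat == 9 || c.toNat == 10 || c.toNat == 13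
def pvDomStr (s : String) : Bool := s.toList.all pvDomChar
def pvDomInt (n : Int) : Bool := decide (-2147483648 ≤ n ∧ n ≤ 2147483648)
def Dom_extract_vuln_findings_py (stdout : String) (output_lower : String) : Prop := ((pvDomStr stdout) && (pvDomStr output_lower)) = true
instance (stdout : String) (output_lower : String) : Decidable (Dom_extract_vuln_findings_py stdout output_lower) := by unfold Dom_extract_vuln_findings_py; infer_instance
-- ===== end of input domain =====

-- B replaces A's per-marker rescan of all the lines by one precomputed present-marker list and
-- a single pass over the lines that records the first matching line per marker; same results.

-- ===== PORT A =====
-- A: for each marker present in output_lower, update severity and append the first line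
-- matching the marker (inner for + break = find?).
def extract_vuln_findings_py (stdout : String) (output_lower : String) : List String × String :=
  let vuln_markers := ["vulnerable", "cve-", "exploit", "injection", "xss", "rce"]
  vuln_markers.foldl (fun st marker =>
    if PySem.Str.isIn marker output_lower then
      let severity := if marker = "exploit" ∨ marker = "rce" then "high" else "medium"
      match (PySem.Str.splitlines stdout).find? (fun line =>
          PySem.Str.isIn marker (PySem.Str.lower line) &&
            decide (5 < PySem.Str.len (PySem.Str.strip line))) with
      | some line => (st.1 ++ [PySem.Str.slice (PySem.Str.strip line) none (some 150)], severity)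
      | none => (st.1, severity)
    else st) ([], "info")

-- ===== PORT B =====
-- one line-processing step of B: if the stripped line is long enough, try to record it
-- for every present marker not yet recorded
def pvAltStep (present : List String) (d : PySem.Dict String String) (line : String) :
    PySem.Dict String String :=
  let stripped := PySem.Str.strip line
  if 5 < PySem.Str.len stripped then
    let ll := PySem.Str.lower line
    present.foldl (fun d m =>
      if !(d.contains m) && PySem.Str.isIn m ll then
        d.insert m (PySem.Str.slice stripped none (some 150))
      else d) d
  else d

def extract_vuln_findings_py_alt (stdout : String) (output_lower : String) : List String × String :=
  let vuln_markers := ["vulnerable", "cve-", "exploit", "injection", "xss", "rce"]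
  let present := vuln_markers.filter (fun m => PySem.Str.isIn m output_lower)
  let severity :=
    match present.getLast? with
    | none => "info"
    | some m => if m = "exploit" ∨ m = "rce" then "high" else "medium"
  let first := (PySem.Str.splitlines stdout).foldl (pvAltStep present) PySem.Dict.empty
  (present.filterMap (fun m => first.get? m), severity)

-- ===== PRECONDITION & SPEC =====
def Spec_extract_vuln_findings_py (stdout : String) (output_lower : String) (out : List String × String) : Prop := out = extract_vuln_findings_py_alt stdout output_lower
instance (stdout : String) (output_lower : String) (out : List String × String) : Decidable (Spec_extract_vuln_findings_py stdout output_lower out) := by unfold Spec_extract_vuln_findings_py; infer_instance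

-- ===== CLAIM (what is proved, stated in full; the proofs are below) =====
def Claim_equal_extract_vuln_findings_py : Prop := ∀ (stdout : String) (output_lower : String), Dom_extract_vuln_findings_py stdout output_lower → Spec_extract_vuln_findings_py stdout output_lower (extract_vuln_findings_py stdout output_lower)

-- ===== LEMMAS AND PROOFS =====

-- shared vocabulary for the proofs
def pvPred (m line : String) : Bool :=
  PySem.Str.isIn m (PySem.Str.lower line) && decide (5 < PySem.Str.len (PySem.Str.strip line))

def pvTrunc (line : String) : String :=
  PySem.Str.slice (PySem.Str.strip line) none (some 150)

def pvSev (m : String) : String := if m = "exploit" ∨ m = "rce" then "high" else "medium"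

-- F m: the first matching line for marker m, truncated
def pvF (lines : List String) (m : String) : Option String :=
  (lines.find? (pvPred m)).map pvTrunc

-- the inner fold of pvAltStep leaves keys not in ms untouched
theorem pvInner_not_mem (ll v : String) (ms : List String) (d : PySem.Dict String String)
    (m : String) (hm : m ∉ ms) :
    (ms.foldl (fun d m' =>
      if !(d.contains m') && PySem.Str.isIn m' ll then d.insert m' v else d) d).get? m
      = d.get? m := by
  induction ms generalizing d with
  | nil => rfl
  | cons a t ih =>
    simp only [List.mem_cons, not_or] at hm
    simp only [List.foldl_cons]
    rw [ih _ hm.2]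
    split
    · exact PySem.Dict.get?_insert_of_ne d v hm.1
    · rfl

-- the inner fold: for m ∈ ms (ms nodup), get? m becomes (old).or (if m matches the line)
theorem pvInner_get? (ll v : String) (ms : List String) (d : PySem.Dict String String)
    (m : String) (hnd : ms.Nodup) (hm : m ∈ ms) :
    (ms.foldl (fun d m' =>
      if !(d.contains m') && PySem.Str.isIn m' ll then d.insert m' v else d) d).get? m
      = (d.get? m).or (if PySem.Str.isIn m ll then some v else none) := by
  induction ms generalizing d with
  | nil => simp at hm
  | cons a t ih =>
    simp only [List.foldl_cons]
    rcases List.mem_cons.mp hm with h | h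
    · subst h
      have hnotin : m ∉ t := (List.nodup_cons.mp hnd).1
      rw [pvInner_not_mem ll v t _ m hnotin]
      rw [PySem.Dict.contains_eq_isSome_get?]
      cases hg : d.get? m with
      | some w => simp [hg]
      | none =>
        simp only [Option.isSome_none, Bool.not_false, Bool.true_and, Option.none_or]
        split
        · exact PySem.Dict.get?_insert_self d m v
        · exact hg
    · have hne : m ≠ a := fun he => (List.nodup_cons.mp hnd).1 (he ▸ h)
      rw [ih _ (List.nodup_cons.mp hnd).2 h]
      congr 1
      split
      · exact PySem.Dict.get?_insert_of_ne d v hne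
      · rfl

-- the line fold: for a present marker m, the dict holds the first matching line
theorem pvLines_get? (present : List String) (hnd : present.Nodup) (m : String)
    (hm : m ∈ present) (lines : List String) (d : PySem.Dict String String) :
    (lines.foldl (pvAltStep present) d).get? m = (d.get? m).or (pvF lines m) := by
  induction lines generalizing d with
  | nil => simp [pvF]
  | cons line rest ih =>
    simp only [List.foldl_cons]
    rw [ih]
    unfold pvF
    rw [List.find?_cons]
    unfold pvAltStep
    by_cases hlen : 5 < PySem.Str.len (PySem.Str.strip line)
    · rw [if_pos hlen, pvInner_get? (PySem.Str.lower line) _ present d m hnd hm]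
      have hp : pvPred m line = PySem.Str.isIn m (PySem.Str.lower line) := by
        unfold pvPred; rw [decide_eq_true hlen, Bool.and_true]
      rw [hp]
      cases hIn : PySem.Str.isIn m (PySem.Str.lower line) with
      | true =>
        simp only [Option.or_assoc, Option.map_some]
        rfl
      | false =>
        simp
    · rw [if_neg hlen]
      have hp : pvPred m line = false := by
        unfold pvPred; rw [decide_eq_false hlen, Bool.and_false]
      rw [hp]

-- A's marker fold, fully characterised
theorem pvA_fold (output_lower : String) (lines : List String) (ms : List String)
    (acc : List String) (sev : String) :
    ms.foldl (fun st marker =>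
      if PySem.Str.isIn marker output_lower then
        let severity := if marker = "exploit" ∨ marker = "rce" then "high" else "medium"
        match lines.find? (fun line =>
            PySem.Str.isIn marker (PySem.Str.lower line) &&
              decide (5 < PySem.Str.len (PySem.Str.strip line))) with
        | some line => (st.1 ++ [PySem.Str.slice (PySem.Str.strip line) none (some 150)], severity)
        | none => (st.1, severity)
      else st) (acc, sev)
      = (acc ++ (ms.filter (fun m => PySem.Str.isIn m output_lower)).filterMap (pvF lines),
         match (ms.filter (fun m => PySem.Str.isIn m output_lower)).getLast? with
         | none => sev
         | some m => pvSev m) := by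
  induction ms generalizing acc sev with
  | nil => simp
  | cons a t ih =>
    simp only [List.foldl_cons, List.filter_cons]
    by_cases hIn : PySem.Str.isIn a output_lower = true
    · rw [if_pos hIn, if_pos hIn]
      have hF : (fun line => PySem.Str.isIn a (PySem.Str.lower line) &&
          decide (5 < PySem.Str.len (PySem.Str.strip line))) = pvPred a := by
        funext line; rfl
      rw [hF]
      cases hfind : lines.find? (pvPred a) with
      | some line =>
        rw [ih]
        have hFa : pvF lines a = some (pvTrunc line) := by simp [pvF, hfind]
        rw [List.filterMap_cons, hFa]
        refine Prod.ext ?_ ?_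
        · show (acc ++ [PySem.Str.slice (PySem.Str.strip line) none (some 150)]) ++ _ = _
          rw [List.append_assoc]
          rfl
        · rw [List.getLast?_cons]
          cases hl : (t.filter (fun m => PySem.Str.isIn m output_lower)).getLast? with
          | none => simp [pvSev]
          | some b => simp
      | none =>
        rw [ih]
        have hFa : pvF lines a = none := by simp [pvF, hfind]
        rw [List.filterMap_cons, hFa]
        refine Prod.ext ?_ ?_
        · rfl
        · rw [List.getLast?_cons]
          cases hl : (t.filter (fun m => PySem.Str.isIn m output_lower)).getLast? with
          | none => simp [pvSev]
          | some b => simp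
    · rw [if_neg hIn, if_neg hIn]
      rw [ih]

-- ===== VERDICT (by name: the statement is the Claim_ definition above) =====
theorem extract_vuln_findings_py_spec : Claim_equal_extract_vuln_findings_py := by
  intro stdout output_lower _
  show extract_vuln_findings_py stdout output_lower = extract_vuln_findings_py_alt stdout output_lower
  unfold extract_vuln_findings_py extract_vuln_findings_py_alt
  simp only []
  set markers : List String := ["vulnerable", "cve-", "exploit", "injection", "xss", "rce"] with hmk
  set lines := PySem.Str.splitlines stdout with hlines
  set present := markers.filter (fun m => PySem.Str.isIn m output_lower) with hpres
  have hnd : present.Nodup := List.Nodup.filter _ (by rw [hmk]; decide)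
  rw [pvA_fold output_lower lines markers [] "info"]
  refine Prod.ext ?_ ?_
  · show present.filterMap (pvF lines)
        = present.filterMap (fun m => (lines.foldl (pvAltStep present) PySem.Dict.empty).get? m)
    apply List.filterMap_congr
    intro m hm
    rw [pvLines_get? present hnd m hm lines PySem.Dict.empty]
    simp [PySem.Dict.get?_empty]
  · show (match present.getLast? with | none => "info" | some m => pvSev m) = _
    cases present.getLast? with
    | none => rfl
    | some m => rfl
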